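-- pv_equiv track=rewrite | github.com/daviddjons-debug/agent-orchestration-lab | scripts/builder.py | is_allowed_target
-- ===== SOURCE A (Python) =====
-- def is_allowed_target(target_rel: str, allowed_change_set: list[str]) -> bool:
--     normalized_target = target_rel.strip("/")
--     for raw in allowed_change_set:
--         zone = raw.strip()
--         if not zone:
--             continue
--         normalized_zone = zone.strip("/")
--         if zone.endswith("/"):
--             if normalized_target == normalized_zone or normalized_target.startswith(normalized_zone + "/"):
--                 return True
--         else:
--             if normalized_target == normalized_zone:
--                 return True
--     return False
-- ===== SOURCE B (Python) =====
-- def is_allowed_target(target_rel: str, allowed_change_set: list[str]) -> bool: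
--     nt = target_rel.strip("/")
--     # slash-boundary prefixes of nt: nt startswith p+"/" iff p is in this set
--     ancestors = {nt[:i] for i, c in enumerate(nt) if c == "/"}
--
--     def matches(raw: str) -> bool:
--         zone = raw.strip()
--         if not zone:
--             return False
--         nz = zone.strip("/")
--         return nz == nt or (zone.endswith("/") and nz in ancestors)
--
--     return any(map(matches, allowed_change_set))
-- ===== Notes on version B (the rewrite author's own statement) =====
-- stated objective: alternative
-- what changed: Instead of testing each zone against the target with string-prefix comparisons, B precomputes the set of slash-boundary ancestor prefixes of the normalized target once, so every directory zone's prefix test becomes a single set-membership lookup and startswith disappears entirely.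
import Mathlib
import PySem

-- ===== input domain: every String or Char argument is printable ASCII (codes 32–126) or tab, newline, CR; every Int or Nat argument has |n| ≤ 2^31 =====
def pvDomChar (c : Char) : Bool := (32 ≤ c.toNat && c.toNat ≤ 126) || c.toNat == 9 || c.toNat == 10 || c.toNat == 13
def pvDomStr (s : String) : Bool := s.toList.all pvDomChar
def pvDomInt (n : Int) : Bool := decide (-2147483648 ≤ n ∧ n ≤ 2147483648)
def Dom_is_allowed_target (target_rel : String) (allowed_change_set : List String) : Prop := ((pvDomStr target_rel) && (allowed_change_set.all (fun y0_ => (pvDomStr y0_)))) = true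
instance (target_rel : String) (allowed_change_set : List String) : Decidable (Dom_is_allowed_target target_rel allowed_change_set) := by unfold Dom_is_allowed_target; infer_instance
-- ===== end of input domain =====

-- B indexes the TARGET instead of scanning with string-prefix tests: it precomputes the set of
-- slash-boundary ancestor prefixes of the normalized target once, so each directory zone is
-- answered by a set-membership lookup in place of A's startswith comparison (alternative algorithm).


-- ===== PORT A =====
-- A's early-return scan: each zone is tested against the target as it is visited.
def isAllowedGo (nt : String) : List String → Bool
  | [] => false
  | raw :: rest =>
    let zone := PySem.Str.strip raw
    if zone = "" then isAllowedGo nt rest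
    else
      let nz := PySem.Str.stripChars zone "/"
      if PySem.Str.endswith zone "/" then
        if nt == nz || PySem.Str.startswith nt (nz ++ "/") then true else isAllowedGo nt rest
      else
        if nt == nz then true else isAllowedGo nt rest

def is_allowed_target (target_rel : String) (allowed_change_set : List String) : Bool :=
  isAllowedGo (PySem.Str.stripChars target_rel "/") allowed_change_set

-- ===== PORT B =====
-- ancestors = {nt[:i] for i, c in enumerate(nt) if c == "/"}
def iatAncestors (nt : String) : PySem.Set String :=
  PySem.Set.ofList
    (((PySem.List.enumerate nt.toList 0).filter (fun p => p.2 == '/')).map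
      (fun p => PySem.Str.slice nt none (some p.1)))

-- matches(raw)
def iatMatches (nt : String) (ancestors : PySem.Set String) (raw : String) : Bool :=
  let zone := PySem.Str.strip raw
  if zone = "" then false
  else
    let nz := PySem.Str.stripChars zone "/"
    nz == nt || (PySem.Str.endswith zone "/" && PySem.Set.contains ancestors nz)

def is_allowed_target_alt (target_rel : String) (allowed_change_set : List String) : Bool :=
  let nt := PySem.Str.stripChars target_rel "/"
  let ancestors := iatAncestors nt
  allowed_change_set.any (fun raw => iatMatches nt ancestors raw)

-- ===== PRECONDITION & SPEC =====
def Spec_is_allowed_target (target_rel : String) (allowed_change_set : List String) (out : Bool) : Prop := out = is_allowed_target_alt target_rel allowed_change_set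
instance (target_rel : String) (allowed_change_set : List String) (out : Bool) : Decidable (Spec_is_allowed_target target_rel allowed_change_set out) := by unfold Spec_is_allowed_target; infer_instance

-- ===== CLAIM (what is proved, stated in full; the proofs are below) =====
def Claim_equal_is_allowed_target : Prop := ∀ (target_rel : String) (allowed_change_set : List String), Dom_is_allowed_target target_rel allowed_change_set → Spec_is_allowed_target target_rel allowed_change_set (is_allowed_target target_rel allowed_change_set)

-- ===== LEMMAS AND PROOFS =====

-- prefix-with-marker characterisation: l₁ ++ [c] is a prefix of l₂ iff c sits at index l₁.length
theorem prefix_snoc_iff {α : Type} (l₁ l₂ : List α) (c : α) :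
    (l₁ ++ [c]) <+: l₂ ↔ ∃ (k : Nat) (h : k < l₂.length), l₂[k] = c ∧ l₂.take k = l₁ := by
  constructor
  · rintro ⟨t, ht⟩
    refine ⟨l₁.length, ?_, ?_, ?_⟩ <;> simp [← ht]
  · rintro ⟨k, hk, hc, htake⟩
    refine ⟨l₂.drop (k + 1), ?_⟩
    rw [← htake, ← hc]
    simp [List.take_append_getElem, List.take_append_drop]

theorem contains_iatAncestors (nt nz : String) :
    PySem.Set.contains (iatAncestors nt) nz = PySem.Str.startswith nt (nz ++ "/") := by
  rw [Bool.eq_iff_iff]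
  have h2 : PySem.Str.startswith nt (nz ++ "/") = true ↔
      ∃ (k : Nat) (h : k < nt.toList.length), nt.toList[k] = '/' ∧ nt.toList.take k = nz.toList := by
    have h : (nz ++ "/").toList = nz.toList ++ ['/'] := by simp [String.toList_append]
    simp [h, PySem.Chars.startswith_iff, prefix_snoc_iff]
  rw [h2]
  simp [iatAncestors, PySem.Set.contains, PySem.Set.mem_ofList, List.mem_filter,
        PySem.List.mem_enumerate_iff, String.ext_iff]

-- per-element agreement: B's matches computes A's single-zone test
theorem matches_eq_go_single (nt raw : String) :
    iatMatches nt (iatAncestors nt) raw = isAllowedGo nt [raw] := by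
  have hnil : isAllowedGo nt [] = false := rfl
  have hbc : (PySem.Str.stripChars (PySem.Str.strip raw) "/" == nt)
      = (nt == PySem.Str.stripChars (PySem.Str.strip raw) "/") := Bool.beq_comm
  unfold iatMatches isAllowedGo
  dsimp only
  rw [contains_iatAncestors, hbc]
  by_cases h1 : PySem.Str.strip raw = ""
  · simp [h1, hnil]
  · simp only [PySem.Str.endswith_eq] at *
    by_cases h2 : PySem.Chars.endswith (PySem.Chars.strip raw.toList) "/".toList = true
    all_goals
      cases hnt : (nt == PySem.Str.stripChars (PySem.Str.strip raw) "/") <;>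
        simp_all

theorem go_cons (nt raw : String) (rest : List String) :
    isAllowedGo nt (raw :: rest) = (isAllowedGo nt [raw] || isAllowedGo nt rest) := by
  cases rest with
  | nil => simp [isAllowedGo]
  | cons b l =>
    unfold isAllowedGo
    dsimp only
    split_ifs <;> simp_all [isAllowedGo]

-- any over the list computes A's early-return scan
theorem any_eq_go (nt : String) (l : List String) :
    l.any (fun raw => iatMatches nt (iatAncestors nt) raw) = isAllowedGo nt l := by
  induction l with
  | nil => simp [isAllowedGo]
  | cons raw rest ih =>
    rw [List.any_cons, ih, matches_eq_go_single, ← go_cons]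

-- ===== VERDICT (by name: the statement is the Claim_ definition above) =====
theorem is_allowed_target_spec : Claim_equal_is_allowed_target := by
  intro target_rel acs _
  unfold Spec_is_allowed_target is_allowed_target is_allowed_target_alt
  rw [any_eq_go]
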